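-- pv_equiv track=rewrite | github.com/burd5/codewars_python | mutate_my_strings.py | mutate_my_strings
-- ===== SOURCE A (Python) =====
-- def mutate_my_strings(s1,s2):
--     s = s1 + '\n'
--     s1 = list(s1)
--     s2 = list(s2)
--     for i in range(len(s1)):
--         if s1[i] !=s2[i]:
--             s1[i] = s2[i]
--             s += "".join(s1) + '\n'
--     return(s)
-- ===== SOURCE B (Python) =====
-- def mutate_my_strings(s1, s2):
--     # Each emitted line equals s2 up to the mutated position and s1 after it,
--     # so no mutable character list is needed.
--     return s1 + '\n' + ''.join(
--         s2[:i + 1] + s1[i + 1:] + '\n'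
--         for i in range(len(s1)) if s1[i] != s2[i]
--     )
-- ===== Notes on version B (the rewrite author's own statement) =====
-- stated objective: simpler
-- what changed: B drops A's mutable character list entirely: it emits each intermediate state directly as the slice expression s2[:i+1] + s1[i+1:] joined in one comprehension, since positions already scanned agree with s2.
import Mathlib
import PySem

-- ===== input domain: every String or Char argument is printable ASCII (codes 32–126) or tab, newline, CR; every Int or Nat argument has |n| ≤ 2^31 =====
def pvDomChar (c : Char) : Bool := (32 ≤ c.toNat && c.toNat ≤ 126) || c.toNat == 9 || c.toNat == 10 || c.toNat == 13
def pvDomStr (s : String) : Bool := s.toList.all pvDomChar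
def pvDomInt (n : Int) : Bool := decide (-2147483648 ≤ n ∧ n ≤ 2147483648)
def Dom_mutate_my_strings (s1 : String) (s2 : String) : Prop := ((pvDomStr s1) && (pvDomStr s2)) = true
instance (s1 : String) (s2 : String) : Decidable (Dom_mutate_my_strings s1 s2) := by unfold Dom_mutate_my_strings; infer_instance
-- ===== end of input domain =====

-- B replaces A's mutable character list by directly emitting each line as s2[:i+1] + s1[i+1:] (simpler, one comprehension).

-- ===== PORT A =====
-- A mutates a list copy of s1 in place and re-joins it after every change.
-- s2[i] may raise IndexError in Python (when len(s2) < len(s1)): ported with pyGetD,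
-- exact under Pre_ (indices in range); those inputs are excluded by Pre_.
def mutate_my_strings (s1 : String) (s2 : String) : String :=
  let l1 := s1.toList
  let l2 := s2.toList
  let st := (List.range l1.length).foldl
    (fun (st : List Char × List Char) (i : Nat) =>
      if PySem.List.pyGetD st.1 (i : Int) ' ' ≠ PySem.List.pyGetD l2 (i : Int) ' ' then
        let cur := PySem.List.pySetD st.1 (i : Int) (PySem.List.pyGetD l2 (i : Int) ' ')
        (cur, st.2 ++ cur ++ ['\n'])
      else st)
    (l1, l1 ++ ['\n'])
  String.mk st.2

-- ===== PORT B =====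
-- ''.join(s2[:i+1] + s1[i+1:] + '\n' for i in range(len(s1)) if s1[i] != s2[i]);
-- slices with nonnegative bounds are take/drop (exact), indexing via getD (in range under Pre_).
def mutate_my_strings_alt (s1 : String) (s2 : String) : String :=
  let l1 := s1.toList
  let l2 := s2.toList
  String.mk (l1 ++ '\n' ::
    (((List.range l1.length).filter (fun i => l1.getD i ' ' != l2.getD i ' ')).map
      (fun i => l2.take (i + 1) ++ l1.drop (i + 1) ++ ['\n'])).flatten)

-- ===== PRECONDITION & SPEC =====
-- Pre_ excludes len(s1) > len(s2): there Python A raises IndexError at s2[i] (B raises identically).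
def Pre_mutate_my_strings (s1 : String) (s2 : String) : Prop :=
  s1.toList.length ≤ s2.toList.length
instance (s1 : String) (s2 : String) : Decidable (Pre_mutate_my_strings s1 s2) := by
  unfold Pre_mutate_my_strings; infer_instance

def pvWitness_mutate_my_strings : String × String := ("abc", "axcd")

def Spec_mutate_my_strings (s1 : String) (s2 : String) (out : String) : Prop := out = mutate_my_strings_alt s1 s2
instance (s1 : String) (s2 : String) (out : String) : Decidable (Spec_mutate_my_strings s1 s2 out) := by unfold Spec_mutate_my_strings; infer_instance

-- ===== CLAIM (what is proved, stated in full; the proofs are below) =====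
def Claim_equal_mutate_my_strings : Prop := ∀ (s1 : String) (s2 : String), Dom_mutate_my_strings s1 s2 → Pre_mutate_my_strings s1 s2 → Spec_mutate_my_strings s1 s2 (mutate_my_strings s1 s2)

-- ===== LEMMAS AND PROOFS =====

-- the current list after processing indices < n equals s2's prefix glued to s1's suffix
lemma pv_take_cons (l2 : List Char) (n : Nat) (h2 : n < l2.length) (t : List Char) :
    l2.take n ++ l2[n] :: t = l2.take (n + 1) ++ t := by
  induction l2 generalizing n with
  | nil => simp at h2
  | cons x xs ih =>
    cases n with
    | zero => simp
    | succ m =>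
      have hm : m < xs.length := by simpa using h2
      simp only [List.take_succ_cons, List.getElem_cons_succ, List.cons_append,
        List.cons.injEq, true_and]
      exact ih m hm

lemma pv_getD_mid (l1 l2 : List Char) (n : Nat) (h1 : n < l1.length) (h2 : n ≤ l2.length) :
    (l2.take n ++ l1.drop n).getD n ' ' = l1.getD n ' ' := by
  have hlen : (l2.take n).length = n := by simp [List.length_take]; omega
  rw [List.getD_eq_getElem?_getD, List.getD_eq_getElem?_getD,
      List.getElem?_append_right hlen.le, hlen, Nat.sub_self, List.getElem?_drop]
  simp

lemma pv_set_mid (l1 l2 : List Char) (n : Nat) (h1 : n < l1.length) (h2 : n < l2.length) :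
    (l2.take n ++ l1.drop n).set n (l2.getD n ' ') = l2.take (n + 1) ++ l1.drop (n + 1) := by
  have hlen : (l2.take n).length = n := by simp [List.length_take]; omega
  have hget : l2.getD n ' ' = l2[n] := by
    rw [List.getD_eq_getElem?_getD, List.getElem?_eq_getElem h2]; rfl
  rw [List.set_append, hlen, if_neg (lt_irrefl n), Nat.sub_self,
      List.drop_eq_getElem_cons h1, List.set_cons_zero, hget]
  exact pv_take_cons l2 n h2 _

lemma pv_eq_mid (l1 l2 : List Char) (n : Nat) (h1 : n < l1.length) (h2 : n < l2.length)
    (h : l1.getD n ' ' = l2.getD n ' ') :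
    l2.take n ++ l1.drop n = l2.take (n + 1) ++ l1.drop (n + 1) := by
  have hg1 : l1.getD n ' ' = l1[n] := by
    rw [List.getD_eq_getElem?_getD, List.getElem?_eq_getElem h1]; rfl
  have hg2 : l2.getD n ' ' = l2[n] := by
    rw [List.getD_eq_getElem?_getD, List.getElem?_eq_getElem h2]; rfl
  have hnn : l1[n] = l2[n] := by rw [← hg1, ← hg2]; exact h
  rw [List.drop_eq_getElem_cons h1, hnn]
  exact pv_take_cons l2 n h2 _

lemma pv_main (l1 l2 : List Char) (n : Nat) (hn : n ≤ l1.length) (hle : l1.length ≤ l2.length)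
    (a : List Char) :
    (List.range n).foldl
      (fun (st : List Char × List Char) (i : Nat) =>
        if PySem.List.pyGetD st.1 (i : Int) ' ' ≠ PySem.List.pyGetD l2 (i : Int) ' ' then
          let cur := PySem.List.pySetD st.1 (i : Int) (PySem.List.pyGetD l2 (i : Int) ' ')
          (cur, st.2 ++ cur ++ ['\n'])
        else st)
      (l2.take 0 ++ l1.drop 0, a)
    = (l2.take n ++ l1.drop n,
       a ++ (((List.range n).filter (fun i => l1.getD i ' ' != l2.getD i ' ')).map
         (fun i => l2.take (i + 1) ++ l1.drop (i + 1) ++ ['\n'])).flatten) := by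
  induction n with
  | zero => simp
  | succ n ih =>
    have h1 : n < l1.length := by omega
    have h2 : n < l2.length := by omega
    rw [List.range_succ, List.foldl_append, ih (by omega)]
    have hget := pv_getD_mid l1 l2 n h1 (by omega)
    simp only [List.foldl_cons, List.foldl_nil, PySem.List.pyGetD_natCast]
    by_cases hc : l1.getD n ' ' = l2.getD n ' '
    · have hnot : ¬ ((l2.take n ++ l1.drop n).getD n ' ' ≠ l2.getD n ' ') := by
        rw [hget]; simpa using hc
      rw [if_neg hnot, pv_eq_mid l1 l2 n h1 h2 hc]
      have hb : (l1[n]?.getD ' ' != l2[n]?.getD ' ') = false := by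
        simp only [bne_eq_false_iff_eq]
        simpa only [List.getD_eq_getElem?_getD] using hc
      simp [List.filter_append, hb]
    · have hne : (l2.take n ++ l1.drop n).getD n ' ' ≠ l2.getD n ' ' := by
        rw [hget]; exact hc
      rw [if_pos hne]
      have hset : PySem.List.pySetD (l2.take n ++ l1.drop n) ((n : Nat) : Int) (l2.getD n ' ')
          = (l2.take n ++ l1.drop n).set n (l2.getD n ' ') := by
        simp [PySem.List.pySetD_natCast]
      simp only [hset, pv_set_mid l1 l2 n h1 h2]
      have hb : (l1[n]?.getD ' ' != l2[n]?.getD ' ') = true := by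
        simp only [bne_iff_ne]
        simpa only [List.getD_eq_getElem?_getD] using hc
      simp [List.filter_append, hb, List.append_assoc]

-- ===== VERDICT (by name: the statement is the Claim_ definition above) =====
theorem mutate_my_strings_spec : Claim_equal_mutate_my_strings := by
  intro s1 s2 _ hpre
  unfold Spec_mutate_my_strings mutate_my_strings mutate_my_strings_alt
  have h := pv_main s1.toList s2.toList s1.toList.length le_rfl hpre (s1.toList ++ ['\n'])
  simp only [List.take_zero, List.drop_zero, List.nil_append] at h
  simp only [List.append_assoc] at h ⊢
  simp only [h, List.singleton_append]
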